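-- pv_equiv track=rewrite | github.com/stoneyangxu/python-kata | datastructure/practice/c1/p_1_35.py | has_same_birthday
-- ===== SOURCE A (Python) =====
-- def has_same_birthday(person_list):
--     s = set()
--     for n in person_list:
--         if n in s:
--             return True
--         else:
--             s.add(n)
--     return False
-- ===== SOURCE B (Python) =====
-- def has_same_birthday(person_list):
--     items = list(person_list)
--     return len(set(items)) != len(items)
-- ===== Notes on version B (the rewrite author's own statement) =====
-- stated objective: simpler
-- what changed: Replaces the element-by-element scan with an early return by materializing the input once and comparing the deduplicated size to the original count.
import Mathlib
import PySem

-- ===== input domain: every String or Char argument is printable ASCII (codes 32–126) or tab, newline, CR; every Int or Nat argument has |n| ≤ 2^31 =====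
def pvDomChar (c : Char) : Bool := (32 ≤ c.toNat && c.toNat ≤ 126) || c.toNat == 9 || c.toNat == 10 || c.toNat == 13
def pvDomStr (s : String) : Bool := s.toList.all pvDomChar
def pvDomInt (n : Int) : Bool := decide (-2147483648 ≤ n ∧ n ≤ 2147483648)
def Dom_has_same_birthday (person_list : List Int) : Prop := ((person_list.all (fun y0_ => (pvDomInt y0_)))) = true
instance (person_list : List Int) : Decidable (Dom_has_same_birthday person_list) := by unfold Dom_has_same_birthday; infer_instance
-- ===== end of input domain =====

-- B replaces A's early-exit scan with a one-shot size comparison (simpler decomposition, same O(n) cost).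

-- ===== PORT A =====
-- the 'for n in person_list' loop with its early 'return True'
def hsbLoop (s : PySem.Set Int) : List Int → Bool
  | [] => false
  | n :: rest => if PySem.Set.contains s n then true else hsbLoop (PySem.Set.add s n) rest

def has_same_birthday (person_list : List Int) : Bool :=
  hsbLoop PySem.Set.empty person_list

-- ===== PORT B =====
def has_same_birthday_alt (person_list : List Int) : Bool :=
  let items := person_list
  PySem.Set.len (PySem.Set.ofList items) != PySem.List.len items

-- ===== PRECONDITION & SPEC =====
def Spec_has_same_birthday (person_list : List Int) (out : Bool) : Prop := out = has_same_birthday_alt person_list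
instance (person_list : List Int) (out : Bool) : Decidable (Spec_has_same_birthday person_list out) := by unfold Spec_has_same_birthday; infer_instance

-- ===== CLAIM (what is proved, stated in full; the proofs are below) =====
def Claim_equal_has_same_birthday : Prop := ∀ (person_list : List Int), Dom_has_same_birthday person_list → Spec_has_same_birthday person_list (has_same_birthday person_list)

-- ===== LEMMAS AND PROOFS =====

theorem length_foldl_add_le (xs : List Int) (s : PySem.Set Int) :
    (xs.foldl PySem.Set.add s).length ≤ s.length + xs.length := by
  induction xs generalizing s with
  | nil => simp
  | cons n rest ih =>
    simp only [List.foldl_cons]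
    have h := ih (PySem.Set.add s n)
    have hlen : (PySem.Set.add s n).length ≤ s.length + 1 := by
      unfold PySem.Set.add
      split <;> simp
    simp only [List.length_cons]
    omega

theorem hsbLoop_eq (xs : List Int) (s : PySem.Set Int) :
    hsbLoop s xs = decide (¬ (xs.foldl PySem.Set.add s).length = s.length + xs.length) := by
  induction xs generalizing s with
  | nil => simp [hsbLoop]
  | cons n rest ih =>
    simp only [hsbLoop, List.foldl_cons, List.length_cons]
    by_cases h : PySem.Set.contains s n = true
    · have hm : n ∈ s := by simpa using h
      have hadd : PySem.Set.add s n = s := by simp [PySem.Set.add, hm]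
      rw [if_pos h]
      simp only [hadd]
      have hle := length_foldl_add_le rest s
      symm
      rw [decide_eq_true_iff]
      omega
    · have hm : n ∉ s := by simpa using h
      have hadd : PySem.Set.add s n = s ++ [n] := by simp [PySem.Set.add, hm]
      rw [if_neg h, ih]
      simp only [hadd, List.length_append, List.length_cons, List.length_nil, decide_eq_decide]
      constructor <;> omega

theorem has_same_birthday_spec : Claim_equal_has_same_birthday := by
  intro xs _
  unfold Spec_has_same_birthday has_same_birthday has_same_birthday_alt
  rw [hsbLoop_eq]
  simp only [PySem.Set.len, PySem.List.len, PySem.Set.ofList, PySem.Set.empty, List.length_nil,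
    Nat.zero_add]
  by_cases hL : (xs.foldl PySem.Set.add []).length = xs.length
  · simp [hL]
  · have hc : ((xs.foldl PySem.Set.add []).length : Int) ≠ (xs.length : Int) := by
      exact_mod_cast hL
    simp [hL, hc]
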